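-- pv_equiv track=rewrite | github.com/bingle625/E1I2-Algorithm | 문제풀이/김경린/230118_15036.py | solution
-- ===== SOURCE A (Python) =====
-- def solution(cap, n, deliveries, pickups):
--     answer = 0
--     d_pos, p_pos = n-1, n-1
--     if sum(deliveries) == 0 and sum(pickups) == 0:
--         return 0
--     while d_pos > -1 or p_pos > -1:
--         move = max(d_pos+1, p_pos+1)
--         avail_d, avail_p = cap, cap
--
--         while avail_d > 0 and d_pos > -1:
--             if deliveries[d_pos] > avail_d:
--                 deliveries[d_pos] -= avail_d
--                 avail_d = 0
--             else:
--                 avail_d -= deliveries[d_pos]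
--                 deliveries[d_pos] = 0
--                 while deliveries[d_pos] == 0 and d_pos > -1:
--                     d_pos -= 1
--
--         while avail_p > 0 and p_pos > -1:
--             if pickups[p_pos] > avail_p:
--                 pickups[p_pos] -= avail_p
--                 avail_p = 0
--             else:
--                 avail_p -= pickups[p_pos]
--                 pickups[p_pos] = 0
--                 while pickups[p_pos] == 0 and p_pos > -1:
--                     p_pos -= 1
--
--         answer += 2*move
--
--     return answer
-- ===== SOURCE B (Python) =====
-- def solution(cap, n, deliveries, pickups):
--     # One pass from the farthest house inward: the truck must make
--     # ceil(remaining_deliveries / cap) delivery trips and ceil(remaining_pickups / cap)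
--     # pickup trips reaching at least house i; summing max of the two over all i and
--     # doubling gives the total distance (telescoping of per-trip farthest house).
--     answer = 0
--     d = p = 0
--     for i in range(n - 1, -1, -1):
--         d += deliveries[i]
--         p += pickups[i]
--         answer += max(-(-d // cap), -(-p // cap))
--     return 2 * answer
-- ===== Notes on version B (the rewrite author's own statement) =====
-- stated objective: faster
-- what changed: Replaces A's trip-by-trip simulation with mutating lists, two pointers and nested consumption loops by a single reverse pass over the n houses that sums, per house, max(ceil(suffix_deliveries/cap), ceil(suffix_pickups/cap)); the inner loops disappear.
-- intended difference: When house n-1 has 0 to deliver and 0 to pick up (but some house still has work), A charges its first trip the full distance n because it computes the move before skipping trailing zeros, returning an overcount; B returns the distance using the true farthest house with demand, which is the intended total. — e.g. on solution(1, 2, [1, 0], [0, 0]): A returns 4, B returns 2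
-- outside the precondition, e.g. on solution(5, 1, [-3], [0]): A returns 2, B returns 0; on solution(0, 1, [0], [0]): A returns 0, B raises ZeroDivisionError
import Mathlib
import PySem

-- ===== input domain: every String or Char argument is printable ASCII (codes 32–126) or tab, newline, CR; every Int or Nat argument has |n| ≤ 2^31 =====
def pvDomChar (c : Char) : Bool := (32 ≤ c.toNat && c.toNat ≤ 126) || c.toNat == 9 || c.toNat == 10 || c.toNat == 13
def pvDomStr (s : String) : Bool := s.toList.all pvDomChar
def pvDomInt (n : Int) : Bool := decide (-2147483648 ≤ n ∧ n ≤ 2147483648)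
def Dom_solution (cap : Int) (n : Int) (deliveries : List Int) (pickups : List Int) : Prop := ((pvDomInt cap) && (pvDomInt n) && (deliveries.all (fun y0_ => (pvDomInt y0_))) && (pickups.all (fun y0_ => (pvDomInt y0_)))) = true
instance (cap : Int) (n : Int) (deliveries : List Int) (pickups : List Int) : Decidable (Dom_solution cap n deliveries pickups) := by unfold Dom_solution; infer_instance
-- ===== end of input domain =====

-- B replaces A's trip-by-trip simulation (which also mutates its list arguments; the
-- equivalence proved here is about the return value) by one O(n) reverse pass summing
-- max(ceil(suffix_deliveries/cap), ceil(suffix_pickups/cap)) per house.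

-- ===== PORT A =====
-- inner `while deliveries[d_pos] == 0 and d_pos > -1: d_pos -= 1` loop;
-- the Nat argument is a fuel/totality guard only (always supplied large enough below)
def skipLoop (l : List Int) (pos : Int) : Nat → Int
  | 0 => pos
  | fuel + 1 =>
    match PySem.List.pyGet? l pos with
    | none => pos          -- Python raises IndexError here (outside Pre_solution)
    | some v => if v = 0 ∧ pos > -1 then skipLoop l (pos - 1) fuel else pos

def skipZeros (l : List Int) (pos : Int) : Int := skipLoop l pos ((pos + 1).toNat + 1)

-- `while avail > 0 and pos > -1: …` consumption loop (shared shape of the delivery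
-- and the pickup inner loop); fuel is a totality guard only
def innerLoop (l : List Int) (avail pos : Int) : Nat → List Int × Int
  | 0 => (l, pos)
  | fuel + 1 =>
    if avail > 0 ∧ pos > -1 then
      match PySem.List.pyGet? l pos with
      | none => (l, pos)   -- Python raises IndexError here (outside Pre_solution)
      | some v =>
        if v > avail then (l.set pos.toNat (v - avail), pos)
        else
          let l' := l.set pos.toNat 0
          let pos' := skipZeros l' pos
          innerLoop l' (avail - v) pos' fuel
    else (l, pos)

def innerStart (cap : Int) (l : List Int) (pos : Int) : List Int × Int :=
  innerLoop l cap pos ((pos + 1).toNat + 1)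

-- outer `while d_pos > -1 or p_pos > -1` loop; fuel is a totality guard only
-- (the Python loops forever e.g. for cap ≤ 0; such inputs are outside Pre_solution)
def outerLoop (cap : Int) (dl pl : List Int) (dpos ppos answer : Int) : Nat → Int
  | 0 => answer
  | fuel + 1 =>
    if dpos > -1 ∨ ppos > -1 then
      let move := max (dpos + 1) (ppos + 1)
      let rd := innerStart cap dl dpos
      let rp := innerStart cap pl ppos
      outerLoop cap rd.1 rp.1 rd.2 rp.2 (answer + 2 * move) fuel
    else answer

def fuelFor (dl pl : List Int) (n : Int) : Nat :=
  (dl.map Int.natAbs).sum + (pl.map Int.natAbs).sum + 2 * n.toNat + 2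

def solution (cap : Int) (n : Int) (deliveries : List Int) (pickups : List Int) : Int :=
  if deliveries.sum = 0 ∧ pickups.sum = 0 then 0
  else outerLoop cap deliveries pickups (n - 1) (n - 1) 0 (fuelFor deliveries pickups n)

-- ===== PORT B =====
-- ceilDiv x cap = -(-x // cap) in Python
def ceilDiv (x cap : Int) : Int := -(PySem.Int.floordiv (-x) cap)

-- `for i in range(n - 1, -1, -1): …`
def altLoop (cap : Int) (dl pl : List Int) : List Int → Int → Int → Int → Int
  | [], answer, _, _ => answer
  | i :: rest, answer, d, p =>
    let d' := d + (PySem.List.pyGet? dl i).getD 0   -- none = IndexError in Python (outside Pre_solution)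
    let p' := p + (PySem.List.pyGet? pl i).getD 0
    altLoop cap dl pl rest (answer + max (ceilDiv d' cap) (ceilDiv p' cap)) d' p'

def solution_alt (cap : Int) (n : Int) (deliveries : List Int) (pickups : List Int) : Int :=
  2 * altLoop cap deliveries pickups (PySem.List.pyRange (n - 1) (-1) (-1)) 0 0 0

-- ===== PRECONDITION & SPEC =====
-- For n ≥ 1, Pre_ restricts to the problem's natural domain: capacity ≥ 1 (A loops
-- forever for cap ≤ 0 once there is work, and B's division needs cap ≠ 0), n ≤ length
-- of both lists (beyond that A raises IndexError) and non-negative amounts (A returns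
-- accidental values for negative entries); for n ≤ 0 both programs return 0 on anything.
def Pre_solution (cap : Int) (n : Int) (deliveries : List Int) (pickups : List Int) : Prop :=
  n ≤ 0 ∨ (1 ≤ cap ∧ n ≤ (deliveries.length : Int) ∧ n ≤ (pickups.length : Int) ∧
    (∀ x ∈ deliveries, 0 ≤ x) ∧ (∀ x ∈ pickups, 0 ≤ x))
instance (cap : Int) (n : Int) (deliveries : List Int) (pickups : List Int) : Decidable (Pre_solution cap n deliveries pickups) := by unfold Pre_solution; infer_instance

def pvWitness_solution : Int × Int × List Int × List Int := (4, 2, [1, 2], [0, 3])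

-- When house n-1 has 0 to deliver and 0 to pick up (but some house still has work),
-- A charges its first trip the full distance n because it computes `move` before
-- skipping trailing zeros, returning an overcount; B returns the distance using the
-- true farthest house with demand, which is the intended total.
def D_solution (cap : Int) (n : Int) (deliveries : List Int) (pickups : List Int) : Prop :=
  1 ≤ n ∧ n ≤ (deliveries.length : Int) ∧ n ≤ (pickups.length : Int) ∧
    deliveries.getD (n - 1).toNat 0 = 0 ∧ pickups.getD (n - 1).toNat 0 = 0 ∧
    ¬(deliveries.sum = 0 ∧ pickups.sum = 0)
instance (cap : Int) (n : Int) (deliveries : List Int) (pickups : List Int) : Decidable (D_solution cap n deliveries pickups) := by unfold D_solution; infer_instance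

def Spec_solution (cap : Int) (n : Int) (deliveries : List Int) (pickups : List Int) (out : Int) : Prop :=
  ¬ D_solution cap n deliveries pickups → out = solution_alt cap n deliveries pickups
instance (cap : Int) (n : Int) (deliveries : List Int) (pickups : List Int) (out : Int) : Decidable (Spec_solution cap n deliveries pickups out) := by unfold Spec_solution; infer_instance

def pvDiffWitness_solution : Int × Int × List Int × List Int := (1, 2, [1, 0], [0, 0])
def pvDiffWitnessOut_solution : Int × Int := (4, 2)

-- ===== CLAIM (what is proved, stated in full; the proofs are below) =====
def Claim_unchanged_solution : Prop := ∀ (cap : Int) (n : Int) (deliveries : List Int) (pickups : List Int), Dom_solution cap n deliveries pickups → Pre_solution cap n deliveries pickups → Spec_solution cap n deliveries pickups (solution cap n deliveries pickups)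
def Claim_changed_solution : Prop := Dom_solution (pvDiffWitness_solution.1) (pvDiffWitness_solution.2.1) (pvDiffWitness_solution.2.2.1) (pvDiffWitness_solution.2.2.2) ∧ Pre_solution (pvDiffWitness_solution.1) (pvDiffWitness_solution.2.1) (pvDiffWitness_solution.2.2.1) (pvDiffWitness_solution.2.2.2) ∧ D_solution (pvDiffWitness_solution.1) (pvDiffWitness_solution.2.1) (pvDiffWitness_solution.2.2.1) (pvDiffWitness_solution.2.2.2) ∧ solution (pvDiffWitness_solution.1) (pvDiffWitness_solution.2.1) (pvDiffWitness_solution.2.2.1) (pvDiffWitness_solution.2.2.2) = pvDiffWitnessOut_solution.1 ∧ solution_alt (pvDiffWitness_solution.1) (pvDiffWitness_solution.2.1) (pvDiffWitness_solution.2.2.1) (pvDiffWitness_solution.2.2.2) = pvDiffWitnessOut_solution.2 ∧ pvDiffWitnessOut_solution.1 ≠ pvDiffWitnessOut_solution.2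
def Claim_exact_solution : Prop := ∀ (cap : Int) (n : Int) (deliveries : List Int) (pickups : List Int), Dom_solution cap n deliveries pickups → Pre_solution cap n deliveries pickups → D_solution cap n deliveries pickups → solution cap n deliveries pickups ≠ solution_alt cap n deliveries pickups

-- ===== LEMMAS AND PROOFS =====

-- cnt l = (index of the last nonzero entry) + 1, i.e. the number of leading entries
-- the truck still has to serve; 0 if l is all zeros
def cnt : List Int → Nat
  | [] => 0
  | x :: xs => if cnt xs = 0 then (if x = 0 then 0 else 1) else 1 + cnt xs

-- "every entry of l at index ≥ k is zero"
def AllZeroFrom (l : List Int) (k : Nat) : Prop := ∀ i : Nat, k ≤ i → l.getD i 0 = 0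

-- per-house trip counts: Bf cap u v = Σ_i max(ceil(suffix_u i / cap), ceil(suffix_v i / cap))
def Bf (cap : Int) : List Int → List Int → Int
  | x :: xs, y :: ys => max (ceilDiv (x + xs.sum) cap) (ceilDiv (y + ys.sum) cap) + Bf cap xs ys
  | _, _ => 0

-- number of indices whose suffix (in u or in v) is still positive
def indc : List Int → List Int → Int
  | x :: xs, y :: ys => (if 0 < x + xs.sum ∨ 0 < y + ys.sum then 1 else 0) + indc xs ys
  | _, _ => 0

-- Bf with pending accumulators (the amounts already summed from houses beyond the list)
def Bfo (cap : Int) : List Int → List Int → Int → Int → Int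
  | x :: xs, y :: ys, d, p =>
    max (ceilDiv (x + xs.sum + d) cap) (ceilDiv (y + ys.sum + p) cap) + Bfo cap xs ys d p
  | _, _, _, _ => 0

lemma allZeroFrom_cons (x : Int) (xs : List Int) (k : Nat) :
    AllZeroFrom (x :: xs) (k + 1) ↔ AllZeroFrom xs k := by
  constructor
  · intro h i hi
    have := h (i + 1) (by omega)
    simpa using this
  · intro h i hi
    match i, hi with
    | i + 1, hi => simpa using h i (by omega)

lemma cnt_le_length (l : List Int) : cnt l ≤ l.length := by
  induction l with
  | nil => simp [cnt]
  | cons x xs ih => simp only [cnt, List.length_cons]; split_ifs <;> omega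

lemma cnt_le_iff_allZero (l : List Int) (k : Nat) : cnt l ≤ k ↔ AllZeroFrom l k := by
  induction l generalizing k with
  | nil =>
    simp only [cnt, AllZeroFrom]
    constructor
    · intro _ i _; simp
    · intro _; omega
  | cons x xs ih =>
    cases k with
    | zero =>
      simp only [cnt]
      constructor
      · intro h i _
        split_ifs at h with h1 h2
        · have hall := (ih 0).mp (by omega)
          cases i with
          | zero => simpa using h2
          | succ j => simpa using hall j (by omega)
        · omega
        · omega
      · intro h
        have hx : x = 0 := by simpa using h 0 (by omega)
        have hxs : cnt xs ≤ 0 := (ih 0).mpr (fun i _ => by simpa using h (i + 1) (by omega))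
        simp [hx]; omega
    | succ k =>
      rw [allZeroFrom_cons, ← ih k]
      simp only [cnt]
      split_ifs <;> omega

lemma cnt_eq_succ (l : List Int) (p : Nat) (h1 : AllZeroFrom l (p + 1)) (h2 : l.getD p 0 ≠ 0) :
    cnt l = p + 1 := by
  have hle : cnt l ≤ p + 1 := (cnt_le_iff_allZero l (p + 1)).mpr h1
  have hgt : ¬ cnt l ≤ p := by
    intro h
    exact h2 ((cnt_le_iff_allZero l p).mp h p (by omega))
  omega

lemma drop_sum_zero_iff (l : List Int) (k : Nat) (hn : ∀ x ∈ l, 0 ≤ x) :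
    (l.drop k).sum = 0 ↔ AllZeroFrom l k := by
  induction l generalizing k with
  | nil => simp [AllZeroFrom]
  | cons x xs ih =>
    have hx : 0 ≤ x := hn x (by simp)
    have hxs : ∀ y ∈ xs, 0 ≤ y := fun y hy => hn y (by simp [hy])
    cases k with
    | zero =>
      simp only [List.drop_zero, List.sum_cons]
      have hs : 0 ≤ xs.sum := List.sum_nonneg hxs
      constructor
      · intro h i _
        have hx0 : x = 0 := by omega
        have hxs0 : xs.sum = 0 := by omega
        have hall := (ih 0 hxs).mp (by simpa using hxs0)
        cases i with
        | zero => simpa using hx0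
        | succ j => simpa using hall j (by omega)
      · intro h
        have hx0 : x = 0 := by simpa using h 0 (by omega)
        have : (xs.drop 0).sum = 0 :=
          (ih 0 hxs).mpr (fun i _ => by simpa using h (i + 1) (by omega))
        simp only [List.drop_zero] at this
        omega
    | succ k =>
      simpa [allZeroFrom_cons] using ih k hxs

lemma drop_sum_nonneg (l : List Int) (k : Nat) (hn : ∀ x ∈ l, 0 ≤ x) :
    0 ≤ (l.drop k).sum := by
  exact List.sum_nonneg (fun x hx => hn x (List.mem_of_mem_drop hx))

lemma sum_pos_iff_cnt (l : List Int) (hn : ∀ x ∈ l, 0 ≤ x) : 0 < l.sum ↔ cnt l ≠ 0 := by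
  have h0 := drop_sum_zero_iff l 0 hn
  rw [← cnt_le_iff_allZero] at h0
  simp only [List.drop_zero] at h0
  have := List.sum_nonneg hn
  omega

lemma sum_drop_set_le (l : List Int) (j i : Nat) (a : Int) (h : i ≤ j) (hj : j < l.length) :
    ((l.set j a).drop i).sum = (l.drop i).sum - l.getD j 0 + a := by
  induction l generalizing i j with
  | nil => simp at hj
  | cons x xs ih =>
    cases j with
    | zero =>
      have hi : i = 0 := by omega
      subst hi
      simp [List.set]
      ring
    | succ j =>
      simp only [List.set]
      cases i with
      | zero =>
        simp only [List.drop_zero, List.sum_cons]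
        have := ih j 0 (by omega) (by simpa using hj)
        simp only [List.drop_zero] at this
        simp [this]
        ring
      | succ i =>
        simp only [List.drop_succ_cons]
        exact ih j i (by omega) (by simpa using hj)

lemma sum_drop_set_gt (l : List Int) (j i : Nat) (a : Int) (h : j < i) :
    ((l.set j a).drop i).sum = (l.drop i).sum := by
  induction l generalizing i j with
  | nil => simp
  | cons x xs ih =>
    cases j with
    | zero =>
      match i, h with
      | i + 1, _ => simp [List.set]
    | succ j =>
      match i, h with
      | i + 1, h => simpa [List.set] using ih j i (by omega)

lemma getD_le_drop_sum (l : List Int) (i j : Nat) (hn : ∀ x ∈ l, 0 ≤ x) (hij : i ≤ j)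
    (hj : j < l.length) : l.getD j 0 ≤ (l.drop i).sum := by
  induction l generalizing i j with
  | nil => simp at hj
  | cons x xs ih =>
    cases j with
    | zero =>
      have hi : i = 0 := by omega
      subst hi
      have : 0 ≤ xs.sum := List.sum_nonneg (fun y hy => hn y (by simp [hy]))
      simp; omega
    | succ j =>
      have hxs : ∀ y ∈ xs, 0 ≤ y := fun y hy => hn y (by simp [hy])
      cases i with
      | zero =>
        have hx : 0 ≤ x := hn x (by simp)
        have := ih 0 j hxs (by omega) (by simpa using hj)
        simp only [List.drop_zero] at this ⊢
        simp only [List.getD_cons_succ, List.sum_cons]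
        omega
      | succ i =>
        simpa using ih i j hxs (by omega) (by simpa using hj)

-- ceiling-division facts
lemma ceilDiv_bounds (s cap : Int) (hc : 1 ≤ cap) :
    (ceilDiv s cap - 1) * cap < s ∧ s ≤ ceilDiv s cap * cap := by
  exact (PySem.Int.neg_floordiv_neg_eq_iff_of_pos (by omega)).mp rfl

lemma ceilDiv_eq_of (s cap q : Int) (hc : 1 ≤ cap) (h1 : (q - 1) * cap < s) (h2 : s ≤ q * cap) :
    ceilDiv s cap = q := by
  exact (PySem.Int.neg_floordiv_neg_eq_iff_of_pos (by omega)).mpr ⟨h1, h2⟩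

lemma cd_zero (cap : Int) (hc : 1 ≤ cap) : ceilDiv 0 cap = 0 := by
  exact ceilDiv_eq_of 0 cap 0 hc (by nlinarith) (by nlinarith)

lemma ceilDiv_nonneg (s cap : Int) (hc : 1 ≤ cap) (hs : 0 ≤ s) : 0 ≤ ceilDiv s cap := by
  obtain ⟨-, h2⟩ := ceilDiv_bounds s cap hc
  by_contra h
  nlinarith

lemma ceilDiv_pos_iff (s cap : Int) (hc : 1 ≤ cap) (hs : 0 ≤ s) :
    0 < ceilDiv s cap ↔ 0 < s := by
  obtain ⟨h1, h2⟩ := ceilDiv_bounds s cap hc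
  constructor
  · intro h; nlinarith
  · intro h; by_contra hq
    have hq' : ceilDiv s cap ≤ 0 := by omega
    nlinarith

lemma ceilDiv_step (s cap : Int) (hc : 1 ≤ cap) (hs : 0 ≤ s) :
    ceilDiv (max (s - cap) 0) cap = ceilDiv s cap - (if 0 < s then 1 else 0) := by
  obtain ⟨h1, h2⟩ := ceilDiv_bounds s cap hc
  rcases lt_trichotomy s 0 with h | h | h
  · omega
  · subst h
    rw [show max (0 - cap) 0 = 0 by omega, cd_zero cap hc]
    simp
  · rw [if_pos h]
    rcases le_or_gt s cap with hsc | hsc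
    · have hq1 : ceilDiv s cap = 1 := ceilDiv_eq_of s cap 1 hc (by nlinarith) (by nlinarith)
      rw [show max (s - cap) 0 = 0 by omega, cd_zero cap hc, hq1]
      omega
    · rw [show max (s - cap) 0 = s - cap by omega]
      exact ceilDiv_eq_of (s - cap) cap (ceilDiv s cap - 1) hc (by nlinarith) (by nlinarith)

lemma pyGet?_getD (l : List Int) (pos : Int) (h0 : 0 ≤ pos) (hl : pos < (l.length : Int)) :
    PySem.List.pyGet? l pos = some (l.getD pos.toNat 0) := by
  have hlt : pos.toNat < l.length := by omega
  rw [PySem.List.pyGet?_of_nonneg l h0, List.getElem?_eq_getElem hlt,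
    List.getD_eq_getElem l 0 hlt]

-- the skip loop lands on the last index that still has a nonzero entry
lemma skipLoop_eq (l : List Int) (pos : Int) (fuel : Nat) (hn : ∀ x ∈ l, 0 ≤ x)
    (hz : AllZeroFrom l (pos + 1).toNat) (h1 : -1 ≤ pos) (h2 : pos < (l.length : Int))
    (hf : (pos + 1).toNat < fuel) : skipLoop l pos fuel = (cnt l : Int) - 1 := by
  induction fuel generalizing pos with
  | zero => omega
  | succ fuel ih =>
    by_cases hp : pos > -1
    · have hpos0 : 0 ≤ pos := by omega
      have hlt : pos.toNat < l.length := by omega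
      have hget := pyGet?_getD l pos hpos0 h2
      simp only [skipLoop]
      split
      case h_1 heq => rw [hget] at heq; cases heq
      case h_2 v heq =>
      rw [hget] at heq
      injection heq with heq
      subst heq
      by_cases hv : l.getD pos.toNat 0 = 0
      · rw [if_pos ⟨hv, hp⟩]
        apply ih
        · intro i hi
          have hi' : pos.toNat ≤ i := by omega
          rcases Nat.eq_or_lt_of_le hi' with he | hlt'
          · rw [← he]; exact hv
          · exact hz i (by omega)
        · omega
        · omega
        · omega
      · rw [if_neg (fun hc => hv hc.1)]
        have := cnt_eq_succ l pos.toNat (fun i hi => hz i (by omega)) hv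
        omega
    · have hpm : pos = -1 := by omega
      subst hpm
      have hz0 : AllZeroFrom l 0 := fun i _ => hz i (by omega)
      have hcl : cnt l = 0 := by
        have := (cnt_le_iff_allZero l 0).mpr hz0
        omega
      simp only [skipLoop]
      split
      case h_1 heq => simp [hcl]
      case h_2 v heq =>
        rw [if_neg (by simp)]
        simp [hcl]

-- one inner consumption loop: lengths and non-negativity are preserved, every suffix
-- sum drops by (up to) avail, and the pointer ends tight on the last nonzero entry
lemma innerLoop_spec (l : List Int) (avail pos : Int) (fuel : Nat) (hn : ∀ x ∈ l, 0 ≤ x)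
    (hz : AllZeroFrom l (pos + 1).toNat) (h1 : -1 ≤ pos) (h2 : pos < (l.length : Int))
    (ha : 0 ≤ avail) (ht : avail = 0 → pos = (cnt l : Int) - 1)
    (hf : (pos + 1).toNat < fuel) :
    (innerLoop l avail pos fuel).1.length = l.length ∧
    (∀ x ∈ (innerLoop l avail pos fuel).1, 0 ≤ x) ∧
    (∀ i : Nat, ((innerLoop l avail pos fuel).1.drop i).sum = max ((l.drop i).sum - avail) 0) ∧
    (innerLoop l avail pos fuel).2 = (cnt (innerLoop l avail pos fuel).1 : Int) - 1 := by
  induction fuel generalizing l avail pos with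
  | zero => omega
  | succ fuel ih =>
    by_cases hcond : avail > 0 ∧ pos > -1
    · obtain ⟨hA, hP⟩ := hcond
      have hpos0 : 0 ≤ pos := by omega
      have hlt : pos.toNat < l.length := by omega
      have hget := pyGet?_getD l pos hpos0 h2
      have hmem : l.getD pos.toNat 0 ∈ l := by
        rw [List.getD_eq_getElem l 0 hlt]; exact List.getElem_mem hlt
      have hv0 : 0 ≤ l.getD pos.toNat 0 := hn _ hmem
      have hdropz : ∀ i : Nat, pos.toNat < i → (l.drop i).sum = 0 := by
        intro i hgt
        exact (drop_sum_zero_iff l i hn).mpr (fun j hj => hz j (by omega))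
      by_cases hvb : l.getD pos.toNat 0 > avail
      · have hres : innerLoop l avail pos (fuel + 1) =
            (l.set pos.toNat (l.getD pos.toNat 0 - avail), pos) := by
          simp only [innerLoop, if_pos (⟨hA, hP⟩ : avail > 0 ∧ pos > -1)]
          split
          case h_1 heq => rw [hget] at heq; cases heq
          case h_2 v heq =>
            rw [hget] at heq
            injection heq with heq
            subst heq
            rw [if_pos hvb]
        rw [hres]
        refine ⟨List.length_set .., ?_, ?_, ?_⟩
        · intro x hx
          rcases List.mem_or_eq_of_mem_set hx with h | h
          · exact hn x h
          · omega
        · intro i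
          by_cases hile : i ≤ pos.toNat
          · rw [sum_drop_set_le l pos.toNat i _ hile hlt]
            have := getD_le_drop_sum l i pos.toNat hn hile hlt
            omega
          · have hgt : pos.toNat < i := by omega
            rw [sum_drop_set_gt l pos.toNat i _ hgt, hdropz i hgt]
            omega
        · have hzset : AllZeroFrom (l.set pos.toNat (l.getD pos.toNat 0 - avail)) (pos.toNat + 1) := by
            intro i hi
            rw [List.getD_eq_getElem?_getD, List.getElem?_set_ne (by omega),
              ← List.getD_eq_getElem?_getD]
            exact hz i (by omega)
          have hsetp : (l.set pos.toNat (l.getD pos.toNat 0 - avail)).getD pos.toNat 0 ≠ 0 := by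
            rw [List.getD_eq_getElem?_getD, List.getElem?_set_self hlt, Option.getD_some]
            omega
          have := cnt_eq_succ _ pos.toNat hzset hsetp
          simp only [this]
          omega
      · -- else branch: zero the entry, skip zeros, recurse
        have hl'len : (l.set pos.toNat 0).length = l.length := List.length_set ..
        have hn' : ∀ x ∈ l.set pos.toNat 0, 0 ≤ x := by
          intro x hx
          rcases List.mem_or_eq_of_mem_set hx with h | h
          · exact hn x h
          · omega
        have hgd' : ∀ i : Nat, pos.toNat ≤ i → (l.set pos.toNat 0).getD i 0 = 0 := by
          intro i hi
          rcases Nat.eq_or_lt_of_le hi with he | hlt'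
          · rw [← he, List.getD_eq_getElem?_getD, List.getElem?_set_self hlt]; rfl
          · rw [List.getD_eq_getElem?_getD, List.getElem?_set_ne (by omega),
              ← List.getD_eq_getElem?_getD]
            exact hz i (by omega)
        have hz' : AllZeroFrom (l.set pos.toNat 0) (pos + 1).toNat := by
          intro i hi; exact hgd' i (by omega)
        have hcle : cnt (l.set pos.toNat 0) ≤ pos.toNat :=
          (cnt_le_iff_allZero _ pos.toNat).mpr (fun i hi => hgd' i hi)
        have hskip : skipZeros (l.set pos.toNat 0) pos = (cnt (l.set pos.toNat 0) : Int) - 1 := by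
          apply skipLoop_eq _ _ _ hn' hz' (by omega) (by rw [hl'len]; omega) (by omega)
        have hres : innerLoop l avail pos (fuel + 1) =
            innerLoop (l.set pos.toNat 0) (avail - l.getD pos.toNat 0)
              (skipZeros (l.set pos.toNat 0) pos) fuel := by
          simp only [innerLoop, if_pos (⟨hA, hP⟩ : avail > 0 ∧ pos > -1)]
          split
          case h_1 heq => rw [hget] at heq; cases heq
          case h_2 v heq =>
            rw [hget] at heq
            injection heq with heq
            subst heq
            rw [if_neg hvb]
        obtain ⟨ia, ib, ic, id⟩ := ih (l.set pos.toNat 0) (avail - l.getD pos.toNat 0)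
          (skipZeros (l.set pos.toNat 0) pos)
          hn'
          (by rw [hskip]
              have hcz := (cnt_le_iff_allZero (l.set pos.toNat 0) (cnt (l.set pos.toNat 0))).mp le_rfl
              intro i hi
              exact hcz i (by omega))
          (by rw [hskip]; omega)
          (by rw [hskip, hl'len]
              have h1' := cnt_le_length (l.set pos.toNat 0)
              rw [hl'len] at h1'
              omega)
          (by omega)
          (fun _ => hskip)
          (by rw [hskip]; omega)
        rw [hres]
        refine ⟨by rw [ia, hl'len], ib, ?_, id⟩
        intro i
        rw [ic i]
        by_cases hile : i ≤ pos.toNat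
        · rw [sum_drop_set_le l pos.toNat i _ hile hlt]
          have := getD_le_drop_sum l i pos.toNat hn hile hlt
          have := drop_sum_nonneg l i hn
          omega
        · have hgt : pos.toNat < i := by omega
          rw [sum_drop_set_gt l pos.toNat i _ hgt, hdropz i hgt]
          omega
    · have hres : innerLoop l avail pos (fuel + 1) = (l, pos) := by
        simp only [innerLoop, if_neg hcond]
      rw [hres]
      dsimp only
      refine ⟨rfl, hn, ?_, ?_⟩
      · intro i
        rcases not_and_or.mp hcond with hA | hP
        · have ha0 : avail = 0 := by omega
          subst ha0
          have := drop_sum_nonneg l i hn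
          omega
        · have h0 : (l.drop i).sum = 0 :=
            (drop_sum_zero_iff l i hn).mpr (fun j hj => hz j (by omega))
          rw [h0]
          omega
      · rcases not_and_or.mp hcond with hA | hP
        · exact ht (by omega)
        · have hcl : cnt l = 0 := by
            have := (cnt_le_iff_allZero l 0).mpr (fun i _ => hz i (by omega))
            omega
          rw [hcl]
          omega

lemma Bf_zero (cap : Int) (u v : List Int) (hu : ∀ x ∈ u, x = 0) (hv : ∀ x ∈ v, x = 0)
    (hc : 1 ≤ cap) : Bf cap u v = 0 := by
  induction u generalizing v with
  | nil => cases v <;> simp [Bf]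
  | cons x xs ih =>
    cases v with
    | nil => simp [Bf]
    | cons y ys =>
      have hx : x = 0 := hu x (by simp)
      have hy : y = 0 := hv y (by simp)
      have hxs : xs.sum = 0 := List.sum_eq_zero (fun z hz => hu z (by simp [hz]))
      have hys : ys.sum = 0 := List.sum_eq_zero (fun z hz => hv z (by simp [hz]))
      have ih' := ih ys (fun z hz => hu z (by simp [hz])) (fun z hz => hv z (by simp [hz]))
      simp [Bf, hx, hy, hxs, hys, ih', cd_zero cap hc]

lemma Bf_step (cap : Int) (hc : 1 ≤ cap) : ∀ (u v u' v' : List Int),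
    u.length = v.length → u'.length = u.length → v'.length = v.length →
    (∀ x ∈ u, 0 ≤ x) → (∀ x ∈ v, 0 ≤ x) →
    (∀ i : Nat, (u'.drop i).sum = max ((u.drop i).sum - cap) 0) →
    (∀ i : Nat, (v'.drop i).sum = max ((v.drop i).sum - cap) 0) →
    Bf cap u' v' = Bf cap u v - indc u v := by
  intro u
  induction u with
  | nil =>
    intro v u' v' hlen hlu hlv _ _ _ _
    have hu' : u' = [] := List.eq_nil_of_length_eq_zero (by simpa using hlu)
    subst hu'
    cases v' <;> simp [Bf, indc]
  | cons x xs ih =>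
    intro v u' v' hlen hlu hlv hnu hnv hsu hsv
    match v, u', v', hlen, hlu, hlv with
    | y :: ys, x' :: xs', y' :: ys', hlen, hlu, hlv =>
    have hnxs : ∀ z ∈ xs, 0 ≤ z := fun z hz => hnu z (by simp [hz])
    have hnys : ∀ z ∈ ys, 0 ≤ z := fun z hz => hnv z (by simp [hz])
    have ih' := ih ys xs' ys' (by simpa using hlen) (by simpa using hlu) (by simpa using hlv)
      hnxs hnys (fun i => by simpa using hsu (i + 1)) (fun i => by simpa using hsv (i + 1))
    have hs0 : x' + xs'.sum = max (x + xs.sum - cap) 0 := by simpa using hsu 0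
    have ht0 : y' + ys'.sum = max (y + ys.sum - cap) 0 := by simpa using hsv 0
    have hsx : 0 ≤ x + xs.sum := by
      have := List.sum_nonneg hnxs
      have := hnu x (by simp)
      omega
    have hsy : 0 ≤ y + ys.sum := by
      have := List.sum_nonneg hnys
      have := hnv y (by simp)
      omega
    have hstx := ceilDiv_step (x + xs.sum) cap hc hsx
    have hsty := ceilDiv_step (y + ys.sum) cap hc hsy
    have hqx0 : 0 ≤ ceilDiv (x + xs.sum) cap := ceilDiv_nonneg _ cap hc hsx
    have hqy0 : 0 ≤ ceilDiv (y + ys.sum) cap := ceilDiv_nonneg _ cap hc hsy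
    have hqxp := ceilDiv_pos_iff (x + xs.sum) cap hc hsx
    have hqyp := ceilDiv_pos_iff (y + ys.sum) cap hc hsy
    simp only [Bf, indc, hs0, ht0, ih']
    rw [hstx, hsty]
    have hx1 : 0 < x + xs.sum → 0 < ceilDiv (x + xs.sum) cap := hqxp.mpr
    have hx2 : 0 < ceilDiv (x + xs.sum) cap → 0 < x + xs.sum := hqxp.mp
    have hy1 : 0 < y + ys.sum → 0 < ceilDiv (y + ys.sum) cap := hqyp.mpr
    have hy2 : 0 < ceilDiv (y + ys.sum) cap → 0 < y + ys.sum := hqyp.mp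
    split_ifs <;> omega

lemma indc_eq (u v : List Int) (hu : ∀ x ∈ u, 0 ≤ x) (hv : ∀ x ∈ v, 0 ≤ x)
    (hl : u.length = v.length) : indc u v = ((max (cnt u) (cnt v) : Nat) : Int) := by
  induction u generalizing v with
  | nil =>
    have hv' : v = [] := List.eq_nil_of_length_eq_zero (by simpa using hl.symm)
    subst hv'
    simp [indc, cnt]
  | cons x xs ih =>
    match v, hl with
    | y :: ys, hl =>
    have hnxs : ∀ z ∈ xs, 0 ≤ z := fun z hz => hu z (by simp [hz])
    have hnys : ∀ z ∈ ys, 0 ≤ z := fun z hz => hv z (by simp [hz])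
    have hx0 : 0 ≤ x := hu x (by simp)
    have hy0 : 0 ≤ y := hv y (by simp)
    have hsx : 0 ≤ xs.sum := List.sum_nonneg hnxs
    have hsy : 0 ≤ ys.sum := List.sum_nonneg hnys
    have hpx := sum_pos_iff_cnt xs hnxs
    have hpy := sum_pos_iff_cnt ys hnys
    have ih' := ih ys hnxs hnys (by simpa using hl)
    simp only [indc, cnt, ih']
    have hx1 : 0 < xs.sum → cnt xs ≠ 0 := hpx.mp
    have hx2 : cnt xs ≠ 0 → 0 < xs.sum := hpx.mpr
    have hy1 : 0 < ys.sum → cnt ys ≠ 0 := hpy.mp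
    have hy2 : cnt ys ≠ 0 → 0 < ys.sum := hpy.mpr
    split_ifs <;> push_cast <;> omega

lemma mem_eq_zero_of_allZero (l : List Int) (h : AllZeroFrom l 0) : ∀ x ∈ l, x = 0 := by
  intro x hx
  obtain ⟨i, hi, rfl⟩ := List.mem_iff_getElem.mp hx
  rw [← List.getD_eq_getElem l 0 hi]
  exact h i (by omega)

lemma natAbs_sum_le (l : List Int) : l.sum.toNat ≤ (l.map Int.natAbs).sum := by
  induction l with
  | nil => simp
  | cons x xs ih => simp only [List.sum_cons, List.map_cons]; omega

lemma Bfo_zero_acc (cap : Int) : ∀ (u v : List Int), Bfo cap u v 0 0 = Bf cap u v := by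
  intro u
  induction u with
  | nil => intro v; cases v <;> simp [Bfo, Bf]
  | cons x xs ih =>
    intro v
    cases v with
    | nil => simp [Bfo, Bf]
    | cons y ys => simp [Bfo, Bf, ih ys]

lemma Bfo_append_singleton (cap : Int) : ∀ (u v : List Int) (a b d p : Int),
    u.length = v.length →
    Bfo cap (u ++ [a]) (v ++ [b]) d p =
      max (ceilDiv (a + d) cap) (ceilDiv (b + p) cap) + Bfo cap u v (d + a) (p + b) := by
  intro u
  induction u with
  | nil =>
    intro v a b d p hl
    have hv : v = [] := List.eq_nil_of_length_eq_zero (by simpa using hl.symm)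
    subst hv
    simp only [List.nil_append, Bfo]
    rw [show a + List.sum ([] : List Int) + d = a + d by simp,
      show b + List.sum ([] : List Int) + p = b + p by simp]
  | cons x xs ih =>
    intro v a b d p hl
    match v, hl with
    | y :: ys, hl =>
    simp only [List.cons_append, Bfo]
    rw [ih ys a b d p (by simpa using hl)]
    rw [show x + (xs ++ [a]).sum + d = x + xs.sum + (d + a) by
        rw [List.sum_append]; simp; ring,
      show y + (ys ++ [b]).sum + p = y + ys.sum + (p + b) by
        rw [List.sum_append]; simp; ring]
    ring

lemma alt_take (cap : Int) (dl pl : List Int) : ∀ (m : Nat), m ≤ dl.length → m ≤ pl.length →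
    ∀ (ans d p : Int),
    altLoop cap dl pl (PySem.List.pyRange ((m : Int) - 1) (-1) (-1)) ans d p =
      ans + Bfo cap (dl.take m) (pl.take m) d p := by
  intro m
  induction m with
  | zero =>
    intro _ _ ans d p
    rw [PySem.List.pyRange_neg_one_eq_nil (by omega)]
    simp [altLoop, Bfo]
  | succ m ih =>
    intro hm1 hm2 ans d p
    have hmd : m < dl.length := by omega
    have hmp : m < pl.length := by omega
    rw [show ((m + 1 : Nat) : Int) - 1 = (m : Int) by push_cast; ring,
      PySem.List.pyRange_neg_one_cons (by omega)]
    simp only [altLoop]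
    rw [show PySem.List.pyGet? dl (m : Int) = some dl[m] by
        rw [PySem.List.pyGet?_natCast, List.getElem?_eq_getElem hmd],
      show PySem.List.pyGet? pl (m : Int) = some pl[m] by
        rw [PySem.List.pyGet?_natCast, List.getElem?_eq_getElem hmp]]
    simp only [Option.getD_some]
    rw [show ((m : Int) - 1) = ((m : Nat) : Int) - 1 by rfl]
    rw [ih (by omega) (by omega)]
    rw [List.take_succ, List.take_succ,
      List.getElem?_eq_getElem hmd, List.getElem?_eq_getElem hmp]
    simp only [Option.toList_some]
    rw [Bfo_append_singleton cap _ _ _ _ d p (by simp [List.length_take]; omega)]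
    rw [show dl[m] + d = d + dl[m] by ring, show pl[m] + p = p + pl[m] by ring]
    ring

lemma alt_eq_Bf (cap n : Int) (dl pl : List Int) (h0 : 0 ≤ n)
    (h1 : n ≤ (dl.length : Int)) (h2 : n ≤ (pl.length : Int)) :
    solution_alt cap n dl pl = 2 * Bf cap (dl.take n.toNat) (pl.take n.toNat) := by
  rw [solution_alt, show (n - 1 : Int) = ((n.toNat : Int)) - 1 by omega,
    alt_take cap dl pl n.toNat (by omega) (by omega), Bfo_zero_acc]
  ring

lemma alt_nonpos (cap n : Int) (dl pl : List Int) (hn : n ≤ 0) :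
    solution_alt cap n dl pl = 0 := by
  rw [solution_alt, PySem.List.pyRange_neg_one_eq_nil (by omega)]
  simp [altLoop]

lemma solution_nonpos (cap n : Int) (dl pl : List Int) (hn : n ≤ 0) :
    solution cap n dl pl = 0 := by
  rw [solution]
  split_ifs with h
  · rfl
  · rw [show fuelFor dl pl n = (fuelFor dl pl n - 1) + 1 by unfold fuelFor; omega]
    simp only [outerLoop]
    rw [if_neg (by omega)]

lemma skipLoop_le (l : List Int) : ∀ (fuel : Nat) (pos : Int), skipLoop l pos fuel ≤ pos := by
  intro fuel
  induction fuel with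
  | zero => intro pos; simp [skipLoop]
  | succ fuel ih =>
    intro pos
    simp only [skipLoop]
    split
    · exact le_rfl
    · split_ifs with h
      · exact (ih (pos - 1)).trans (by omega)
      · exact le_rfl

lemma skipLoop_frame (l tail : List Int) : ∀ (fuel : Nat) (pos : Int),
    pos < (l.length : Int) → skipLoop (l ++ tail) pos fuel = skipLoop l pos fuel := by
  intro fuel
  induction fuel with
  | zero => intro pos _; rfl
  | succ fuel ih =>
    intro pos hpos
    by_cases hp : 0 ≤ pos
    · have hlt : pos.toNat < l.length := by omega
      have h12 : PySem.List.pyGet? (l ++ tail) pos = PySem.List.pyGet? l pos := by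
        rw [PySem.List.pyGet?_of_nonneg (l ++ tail) hp, PySem.List.pyGet?_of_nonneg l hp,
          List.getElem?_append_left hlt]
      simp only [skipLoop, h12]
      split
      · rfl
      · split_ifs with h
        · exact ih (pos - 1) (by omega)
        · rfl
    · have hnp : ¬ (-1 < pos) := by omega
      simp only [skipLoop]
      rcases hL : PySem.List.pyGet? (l ++ tail) pos with _ | v <;>
        rcases hR : PySem.List.pyGet? l pos with _ | w <;>
          simp [hnp]

lemma innerLoop_frame (tail : List Int) : ∀ (fuel : Nat) (l : List Int) (avail pos : Int),
    pos < (l.length : Int) →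
    innerLoop (l ++ tail) avail pos fuel =
      ((innerLoop l avail pos fuel).1 ++ tail, (innerLoop l avail pos fuel).2) := by
  intro fuel
  induction fuel with
  | zero => intro l avail pos _; simp [innerLoop]
  | succ fuel ih =>
    intro l avail pos hpos
    by_cases hcond : avail > 0 ∧ pos > -1
    · have hp : (0 : Int) ≤ pos := by omega
      have hlt : pos.toNat < l.length := by omega
      have h12 : PySem.List.pyGet? (l ++ tail) pos = PySem.List.pyGet? l pos := by
        rw [PySem.List.pyGet?_of_nonneg (l ++ tail) hp, PySem.List.pyGet?_of_nonneg l hp,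
          List.getElem?_append_left hlt]
      simp only [innerLoop, if_pos hcond, h12]
      split
      · simp
      · split_ifs with h
        · rw [List.set_append, if_pos hlt]
        · rw [List.set_append, if_pos hlt]
          have hskip : skipZeros (l.set pos.toNat 0 ++ tail) pos = skipZeros (l.set pos.toNat 0) pos := by
            unfold skipZeros
            exact skipLoop_frame (l.set pos.toNat 0) tail _ pos (by simp; omega)
          rw [hskip]
          exact ih (l.set pos.toNat 0) _ _
            ((skipLoop_le (l.set pos.toNat 0) _ pos).trans_lt (by simp; omega))
    · simp [innerLoop, if_neg hcond]

-- with both pointers tight inside the first-n core (the tail beyond n is never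
-- touched by A), the remaining outer loop returns exactly 2 * Bf of the core
lemma outer_tight (cap : Int) (hc : 1 ≤ cap) : ∀ (fuel : Nat) (dl pl td tp : List Int) (ans : Int),
    (∀ x ∈ dl, 0 ≤ x) → (∀ x ∈ pl, 0 ≤ x) → dl.length = pl.length →
    (dl.sum + pl.sum).toNat + cnt dl + cnt pl < fuel →
    outerLoop cap (dl ++ td) (pl ++ tp) ((cnt dl : Int) - 1) ((cnt pl : Int) - 1) ans fuel =
      ans + 2 * Bf cap dl pl := by
  intro fuel
  induction fuel with
  | zero => intro dl pl td tp ans _ _ _ hf; omega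
  | succ fuel ih =>
    intro dl pl td tp ans hnd hnp hlen hf
    by_cases hcond : ((cnt dl : Int) - 1) > -1 ∨ ((cnt pl : Int) - 1) > -1
    · have hzd : AllZeroFrom dl (((cnt dl : Int) - 1) + 1).toNat := by
        have h := (cnt_le_iff_allZero dl (cnt dl)).mp le_rfl
        intro i hi
        exact h i (by omega)
      have hzp : AllZeroFrom pl (((cnt pl : Int) - 1) + 1).toNat := by
        have h := (cnt_le_iff_allZero pl (cnt pl)).mp le_rfl
        intro i hi
        exact h i (by omega)
      have hld := cnt_le_length dl
      have hlp := cnt_le_length pl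
      obtain ⟨da, db, dc, dd⟩ := innerLoop_spec dl cap ((cnt dl : Int) - 1)
        ((((cnt dl : Int) - 1) + 1).toNat + 1) hnd hzd (by omega) (by omega)
        (by omega) (fun h => absurd h (by omega)) (by omega)
      obtain ⟨pa, pb, pc, pd⟩ := innerLoop_spec pl cap ((cnt pl : Int) - 1)
        ((((cnt pl : Int) - 1) + 1).toNat + 1) hnp hzp (by omega) (by omega)
        (by omega) (fun h => absurd h (by omega)) (by omega)
      have hs0d : 0 ≤ dl.sum := List.sum_nonneg hnd
      have hs0p : 0 ≤ pl.sum := List.sum_nonneg hnp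
      have hsum'd := dc 0
      have hsum'p := pc 0
      simp only [List.drop_zero] at hsum'd hsum'p
      have hdz : (dl.drop (cnt dl)).sum = 0 :=
        (drop_sum_zero_iff dl (cnt dl) hnd).mpr ((cnt_le_iff_allZero dl (cnt dl)).mp le_rfl)
      have hpz : (pl.drop (cnt pl)).sum = 0 :=
        (drop_sum_zero_iff pl (cnt pl) hnp).mpr ((cnt_le_iff_allZero pl (cnt pl)).mp le_rfl)
      have hcnt'd : cnt (innerLoop dl cap ((cnt dl : Int) - 1) ((((cnt dl : Int) - 1) + 1).toNat + 1)).1 ≤ cnt dl := by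
        apply (cnt_le_iff_allZero _ (cnt dl)).mpr
        apply (drop_sum_zero_iff _ (cnt dl) db).mp
        rw [dc (cnt dl), hdz]
        omega
      have hcnt'p : cnt (innerLoop pl cap ((cnt pl : Int) - 1) ((((cnt pl : Int) - 1) + 1).toNat + 1)).1 ≤ cnt pl := by
        apply (cnt_le_iff_allZero _ (cnt pl)).mpr
        apply (drop_sum_zero_iff _ (cnt pl) pb).mp
        rw [pc (cnt pl), hpz]
        omega
      have hposd := sum_pos_iff_cnt dl hnd
      have hposp := sum_pos_iff_cnt pl hnp
      have hdec : 0 < dl.sum ∨ 0 < pl.sum := by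
        rcases hcond with h | h
        · exact Or.inl (hposd.mpr (by omega))
        · exact Or.inr (hposp.mpr (by omega))
      simp only [outerLoop, if_pos hcond, innerStart]
      rw [innerLoop_frame td _ dl cap _ (by omega), innerLoop_frame tp _ pl cap _ (by omega)]
      simp only
      rw [dd, pd]
      rw [ih _ _ td tp _ db pb (by rw [da, pa]; exact hlen) (by omega)]
      rw [Bf_step cap hc dl pl _ _ hlen da pa hnd hnp dc pc, indc_eq dl pl hnd hnp hlen]
      have hmv : max ((cnt dl : Int) - 1 + 1) ((cnt pl : Int) - 1 + 1) =
          ((max (cnt dl) (cnt pl) : Nat) : Int) := by push_cast; omega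
      rw [hmv]
      ring
    · have hd0 : cnt dl = 0 := by omega
      have hp0 : cnt pl = 0 := by omega
      have hBf : Bf cap dl pl = 0 :=
        Bf_zero cap dl pl
          (mem_eq_zero_of_allZero dl ((cnt_le_iff_allZero dl 0).mp (by omega)))
          (mem_eq_zero_of_allZero pl ((cnt_le_iff_allZero pl 0).mp (by omega))) hc
      simp only [outerLoop, if_neg hcond, hBf]
      ring
-- main computation: when there is work to do, A returns B's value plus the first-trip
-- overshoot 2*(n - max(cnt dl, cnt pl))
lemma solution_main (cap n : Int) (dl pl : List Int) (hc : 1 ≤ cap)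
    (hl1 : n ≤ (dl.length : Int)) (hl2 : n ≤ (pl.length : Int))
    (hxd : ∀ x ∈ dl, 0 ≤ x) (hxp : ∀ x ∈ pl, 0 ≤ x) (hn1 : 1 ≤ n)
    (hnz : ¬(dl.sum = 0 ∧ pl.sum = 0)) :
    solution cap n dl pl =
      solution_alt cap n dl pl +
        2 * (n - ((max (cnt (dl.take n.toNat)) (cnt (pl.take n.toNat)) : Nat) : Int)) := by
  have hxd' : ∀ x ∈ dl.take n.toNat, 0 ≤ x := fun x hx => hxd x (List.mem_of_mem_take hx)
  have hxp' : ∀ x ∈ pl.take n.toNat, 0 ≤ x := fun x hx => hxp x (List.mem_of_mem_take hx)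
  have hltd : (dl.take n.toNat).length = n.toNat := by simp [List.length_take]; omega
  have hltp : (pl.take n.toNat).length = n.toNat := by simp [List.length_take]; omega
  rw [solution, if_neg hnz]
  obtain ⟨F, hF⟩ : ∃ F, fuelFor dl pl n = F + 1 := ⟨fuelFor dl pl n - 1, by unfold fuelFor; omega⟩
  rw [hF]
  have hcond : (n - 1 : Int) > -1 ∨ (n - 1 : Int) > -1 := Or.inl (by omega)
  simp only [outerLoop, if_pos hcond, innerStart]
  conv_lhs => rw [← List.take_append_drop n.toNat dl, ← List.take_append_drop n.toNat pl]
  rw [innerLoop_frame (dl.drop n.toNat) _ (dl.take n.toNat) cap (n - 1) (by rw [hltd]; omega),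
    innerLoop_frame (pl.drop n.toNat) _ (pl.take n.toNat) cap (n - 1) (by rw [hltp]; omega)]
  simp only
  have hzd : AllZeroFrom (dl.take n.toNat) ((n - 1) + 1).toNat :=
    fun i hi => List.getD_eq_default _ 0 (by rw [hltd]; omega)
  have hzp : AllZeroFrom (pl.take n.toNat) ((n - 1) + 1).toNat :=
    fun i hi => List.getD_eq_default _ 0 (by rw [hltp]; omega)
  obtain ⟨da, db, dc, dd⟩ := innerLoop_spec (dl.take n.toNat) cap (n - 1) (((n - 1) + 1).toNat + 1)
    hxd' hzd (by omega) (by rw [hltd]; omega) (by omega) (fun h => absurd h (by omega)) (by omega)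
  obtain ⟨pa, pb, pc, pd⟩ := innerLoop_spec (pl.take n.toNat) cap (n - 1) (((n - 1) + 1).toNat + 1)
    hxp' hzp (by omega) (by rw [hltp]; omega) (by omega) (fun h => absurd h (by omega)) (by omega)
  rw [dd, pd]
  have hs0d : 0 ≤ (dl.take n.toNat).sum := List.sum_nonneg hxd'
  have hs0p : 0 ≤ (pl.take n.toNat).sum := List.sum_nonneg hxp'
  have hsum'd := dc 0
  have hsum'p := pc 0
  simp only [List.drop_zero] at hsum'd hsum'p
  have hcl'd := cnt_le_length (innerLoop (dl.take n.toNat) cap (n - 1) (((n - 1) + 1).toNat + 1)).1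
  have hcl'p := cnt_le_length (innerLoop (pl.take n.toNat) cap (n - 1) (((n - 1) + 1).toNat + 1)).1
  rw [da, hltd] at hcl'd
  rw [pa, hltp] at hcl'p
  have hsplitd : (dl.map Int.natAbs).sum =
      ((dl.take n.toNat).map Int.natAbs).sum + ((dl.drop n.toNat).map Int.natAbs).sum := by
    rw [← List.sum_append, ← List.map_append, List.take_append_drop]
  have hsplitp : (pl.map Int.natAbs).sum =
      ((pl.take n.toNat).map Int.natAbs).sum + ((pl.drop n.toNat).map Int.natAbs).sum := by
    rw [← List.sum_append, ← List.map_append, List.take_append_drop]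
  have hab_d := natAbs_sum_le (dl.take n.toNat)
  have hab_p := natAbs_sum_le (pl.take n.toNat)
  have hFF : (dl.map Int.natAbs).sum + (pl.map Int.natAbs).sum + 2 * n.toNat + 2 = F + 1 := by
    rw [← hF]; rfl
  rw [outer_tight cap hc F _ _ _ _ _ db pb (by rw [da, pa, hltd, hltp]) (by omega)]
  rw [Bf_step cap hc (dl.take n.toNat) (pl.take n.toNat) _ _ (by rw [hltd, hltp]) da pa
      hxd' hxp' dc pc,
    indc_eq (dl.take n.toNat) (pl.take n.toNat) hxd' hxp' (by rw [hltd, hltp]),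
    alt_eq_Bf cap n dl pl (by omega) hl1 hl2]
  rw [show (n - 1 + 1 : Int) = n by ring, max_self]
  ring

-- ===== VERDICT (by name: the statement is the Claim_ definition above) =====
theorem solution_spec : Claim_unchanged_solution := by
  unfold Claim_unchanged_solution
  intro cap n dl pl hdom hpre
  unfold Spec_solution
  intro hD
  by_cases hn0 : n ≤ 0
  · rw [solution_nonpos cap n dl pl hn0, alt_nonpos cap n dl pl hn0]
  · have hn1 : 1 ≤ n := by omega
    rcases hpre with h | ⟨hc, hl1, hl2, hxd, hxp⟩
    · omega
    by_cases hz0 : dl.sum = 0 ∧ pl.sum = 0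
    · rw [solution, if_pos hz0]
      have hzd : ∀ x ∈ dl, x = 0 :=
        mem_eq_zero_of_allZero dl ((drop_sum_zero_iff dl 0 hxd).mp (by simpa using hz0.1))
      have hzp : ∀ x ∈ pl, x = 0 :=
        mem_eq_zero_of_allZero pl ((drop_sum_zero_iff pl 0 hxp).mp (by simpa using hz0.2))
      rw [alt_eq_Bf cap n dl pl (by omega) hl1 hl2,
        Bf_zero cap _ _ (fun x hx => hzd x (List.mem_of_mem_take hx))
          (fun x hx => hzp x (List.mem_of_mem_take hx)) hc]
      ring
    · have hmain := solution_main cap n dl pl hc hl1 hl2 hxd hxp hn1 hz0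
      have hAB : ¬(dl.getD (n - 1).toNat 0 = 0 ∧ pl.getD (n - 1).toNat 0 = 0) := by
        intro h
        exact hD ⟨hn1, hl1, hl2, h.1, h.2, hz0⟩
      have hltd : (dl.take n.toNat).length = n.toNat := by simp [List.length_take]; omega
      have hltp : (pl.take n.toNat).length = n.toNat := by simp [List.length_take]; omega
      have hled := cnt_le_length (dl.take n.toNat)
      have hlep := cnt_le_length (pl.take n.toNat)
      rw [hltd] at hled
      rw [hltp] at hlep
      have hgetd : (dl.take n.toNat).getD (n - 1).toNat 0 = dl.getD (n - 1).toNat 0 := by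
        rw [List.getD_eq_getElem?_getD, List.getD_eq_getElem?_getD, List.getElem?_take,
          if_pos (by omega)]
      have hgetp : (pl.take n.toNat).getD (n - 1).toNat 0 = pl.getD (n - 1).toNat 0 := by
        rw [List.getD_eq_getElem?_getD, List.getD_eq_getElem?_getD, List.getElem?_take,
          if_pos (by omega)]
      rcases not_and_or.mp hAB with hA | hB
      · have hcd : cnt (dl.take n.toNat) = n.toNat := by
          have := cnt_eq_succ (dl.take n.toNat) (n - 1).toNat
            (fun i hi => List.getD_eq_default _ 0 (by rw [hltd]; omega))
            (by rw [hgetd]; exact hA)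
          omega
        rw [hmain, show ((max (cnt (dl.take n.toNat)) (cnt (pl.take n.toNat)) : Nat) : Int) = n by
          push_cast; omega]
        ring
      · have hcp : cnt (pl.take n.toNat) = n.toNat := by
          have := cnt_eq_succ (pl.take n.toNat) (n - 1).toNat
            (fun i hi => List.getD_eq_default _ 0 (by rw [hltp]; omega))
            (by rw [hgetp]; exact hB)
          omega
        rw [hmain, show ((max (cnt (dl.take n.toNat)) (cnt (pl.take n.toNat)) : Nat) : Int) = n by
          push_cast; omega]
        ring

theorem solution_changed : Claim_changed_solution := by
  unfold Claim_changed_solution; decide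

theorem solution_tight : Claim_exact_solution := by
  unfold Claim_exact_solution
  intro cap n dl pl hdom hpre hD
  obtain ⟨hn1, hl1, hl2, hA, hB, hnz⟩ := hD
  rcases hpre with h | ⟨hc, _, _, hxd, hxp⟩
  · omega
  have hmain := solution_main cap n dl pl hc hl1 hl2 hxd hxp hn1 hnz
  have hltd : (dl.take n.toNat).length = n.toNat := by simp [List.length_take]; omega
  have hltp : (pl.take n.toNat).length = n.toNat := by simp [List.length_take]; omega
  have hgetd : (dl.take n.toNat).getD (n - 1).toNat 0 = 0 := by
    rw [List.getD_eq_getElem?_getD, List.getElem?_take, if_pos (by omega),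
      ← List.getD_eq_getElem?_getD]
    exact hA
  have hgetp : (pl.take n.toNat).getD (n - 1).toNat 0 = 0 := by
    rw [List.getD_eq_getElem?_getD, List.getElem?_take, if_pos (by omega),
      ← List.getD_eq_getElem?_getD]
    exact hB
  have hcd : cnt (dl.take n.toNat) ≤ (n - 1).toNat := by
    apply (cnt_le_iff_allZero _ _).mpr
    intro i hi
    by_cases hil : i = (n - 1).toNat
    · rw [hil]; exact hgetd
    · exact List.getD_eq_default _ 0 (by rw [hltd]; omega)
  have hcp : cnt (pl.take n.toNat) ≤ (n - 1).toNat := by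
    apply (cnt_le_iff_allZero _ _).mpr
    intro i hi
    by_cases hil : i = (n - 1).toNat
    · rw [hil]; exact hgetp
    · exact List.getD_eq_default _ 0 (by rw [hltp]; omega)
  rw [hmain]
  have hM : ((max (cnt (dl.take n.toNat)) (cnt (pl.take n.toNat)) : Nat) : Int) ≤ n - 1 := by
    push_cast; omega
  intro h
  omega
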